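-- pv_equiv track=rewrite | github.com/AdamPesci/python-map | map.py | static_replace_with_local
-- ===== SOURCE A (Python) =====
-- def static_replace_with_local(html_string):
--     # Replace external references with local ones (allows user to manually change if replace with local doesnt work)
--     replacements = {
--         "https://cdn.jsdelivr.net/npm/leaflet@1.9.3/dist/leaflet.js": "assets/leaflet.js",
--         "https://code.jquery.com/jquery-1.12.4.min.js": "assets/jquery.min.js",
--         "https://cdn.jsdelivr.net/npm/bootstrap@5.2.2/dist/js/bootstrap.bundle.min.js": "assets/bootstrap.bundle.min.js",
--         "https://cdnjs.cloudflare.com/ajax/libs/Leaflet.awesome-markers/2.0.2/leaflet.awesome-markers.js": "assets/leaflet.awesome-markers.js",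
--         "https://cdn.jsdelivr.net/npm/leaflet@1.9.3/dist/leaflet.css": "assets/leaflet.css",
--         "https://cdn.jsdelivr.net/npm/bootstrap@5.2.2/dist/css/bootstrap.min.css": "assets/bootstrap.min.css",
--         "https://netdna.bootstrapcdn.com/bootstrap/3.0.0/css/bootstrap.min.css": "assets/bootstrap-3.0.0.min.css",
--         "https://cdn.jsdelivr.net/npm/@fortawesome/fontawesome-free@6.2.0/css/all.min.css": "assets/fontawesome-free-6.2.0.min.css",
--         "https://cdnjs.cloudflare.com/ajax/libs/Leaflet.awesome-markers/2.0.2/leaflet.awesome-markers.css": "assets/leaflet.awesome-markers.css",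
--         "https://cdn.jsdelivr.net/gh/python-visualization/folium/folium/templates/leaflet.awesome.rotate.min.css": "assets/leaflet.awesome.rotate.min.css",
--     }
--
--     for external, local in replacements.items():
--         html_string = html_string.replace(external, local)
--
--     return html_string
-- ===== SOURCE B (Python) =====
-- # One left-to-right scan over the string with a first-match lookup at each position,
-- # replacing A's ten sequential full-string .replace passes; the mapping is kept as two
-- # parallel tuples zipped together.
-- _URLS = (
--     "https://cdn.jsdelivr.net/npm/leaflet@1.9.3/dist/leaflet.js",
--     "https://code.jquery.com/jquery-1.12.4.min.js",
--     "https://cdn.jsdelivr.net/npm/bootstrap@5.2.2/dist/js/bootstrap.bundle.min.js",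
--     "https://cdnjs.cloudflare.com/ajax/libs/Leaflet.awesome-markers/2.0.2/leaflet.awesome-markers.js",
--     "https://cdn.jsdelivr.net/npm/leaflet@1.9.3/dist/leaflet.css",
--     "https://cdn.jsdelivr.net/npm/bootstrap@5.2.2/dist/css/bootstrap.min.css",
--     "https://netdna.bootstrapcdn.com/bootstrap/3.0.0/css/bootstrap.min.css",
--     "https://cdn.jsdelivr.net/npm/@fortawesome/fontawesome-free@6.2.0/css/all.min.css",
--     "https://cdnjs.cloudflare.com/ajax/libs/Leaflet.awesome-markers/2.0.2/leaflet.awesome-markers.css",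
--     "https://cdn.jsdelivr.net/gh/python-visualization/folium/folium/templates/leaflet.awesome.rotate.min.css",
-- )
-- _LOCALS = (
--     "assets/leaflet.js",
--     "assets/jquery.min.js",
--     "assets/bootstrap.bundle.min.js",
--     "assets/leaflet.awesome-markers.js",
--     "assets/leaflet.css",
--     "assets/bootstrap.min.css",
--     "assets/bootstrap-3.0.0.min.css",
--     "assets/fontawesome-free-6.2.0.min.css",
--     "assets/leaflet.awesome-markers.css",
--     "assets/leaflet.awesome.rotate.min.css",
-- )
-- _PAIRS = list(zip(_URLS, _LOCALS))
--
--
-- def static_replace_with_local(html_string):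
--     out = []
--     i = 0
--     n = len(html_string)
--     while i < n:
--         for url, local in _PAIRS:
--             if html_string.startswith(url, i):
--                 out.append(local)
--                 i += len(url)
--                 break
--         else:
--             out.append(html_string[i])
--             i += 1
--     return "".join(out)
-- ===== Notes on version B (the rewrite author's own statement) =====
-- stated objective: alternative
-- what changed: Replaces ten sequential full-string .replace passes over a dict with a single left-to-right scan that at each position substitutes the value of the first matching URL key and jumps past it.
import Mathlib
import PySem

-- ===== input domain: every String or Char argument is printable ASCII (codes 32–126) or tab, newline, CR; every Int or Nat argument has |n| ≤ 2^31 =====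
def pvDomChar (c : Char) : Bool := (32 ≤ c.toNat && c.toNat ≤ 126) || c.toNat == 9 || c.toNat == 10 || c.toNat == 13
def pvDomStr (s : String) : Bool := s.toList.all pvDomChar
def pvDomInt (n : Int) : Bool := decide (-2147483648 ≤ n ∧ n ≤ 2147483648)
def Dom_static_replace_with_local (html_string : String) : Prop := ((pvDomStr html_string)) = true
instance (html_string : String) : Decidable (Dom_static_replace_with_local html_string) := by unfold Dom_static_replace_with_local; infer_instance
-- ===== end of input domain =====

-- B replaces A's ten sequential full-string .replace passes by one left-to-right scan with a
-- first-match lookup at each position (mapping kept as two parallel lists zipped); objective: alternative.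

-- ===== PORT A =====
-- the dict literal, as an association list in insertion order (.items() iterates in this order)
def pvReplacements : List (String × String) :=
  [ ("https://cdn.jsdelivr.net/npm/leaflet@1.9.3/dist/leaflet.js", "assets/leaflet.js"),
    ("https://code.jquery.com/jquery-1.12.4.min.js", "assets/jquery.min.js"),
    ("https://cdn.jsdelivr.net/npm/bootstrap@5.2.2/dist/js/bootstrap.bundle.min.js", "assets/bootstrap.bundle.min.js"),
    ("https://cdnjs.cloudflare.com/ajax/libs/Leaflet.awesome-markers/2.0.2/leaflet.awesome-markers.js", "assets/leaflet.awesome-markers.js"),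
    ("https://cdn.jsdelivr.net/npm/leaflet@1.9.3/dist/leaflet.css", "assets/leaflet.css"),
    ("https://cdn.jsdelivr.net/npm/bootstrap@5.2.2/dist/css/bootstrap.min.css", "assets/bootstrap.min.css"),
    ("https://netdna.bootstrapcdn.com/bootstrap/3.0.0/css/bootstrap.min.css", "assets/bootstrap-3.0.0.min.css"),
    ("https://cdn.jsdelivr.net/npm/@fortawesome/fontawesome-free@6.2.0/css/all.min.css", "assets/fontawesome-free-6.2.0.min.css"),
    ("https://cdnjs.cloudflare.com/ajax/libs/Leaflet.awesome-markers/2.0.2/leaflet.awesome-markers.css", "assets/leaflet.awesome-markers.css"),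
    ("https://cdn.jsdelivr.net/gh/python-visualization/folium/folium/templates/leaflet.awesome.rotate.min.css", "assets/leaflet.awesome.rotate.min.css") ]

-- 'for external, local in replacements.items(): html_string = html_string.replace(external, local)'
def static_replace_with_local (html_string : String) : String :=
  pvReplacements.foldl (fun s p => PySem.Str.replace s p.1 p.2) html_string

-- ===== PORT B =====
-- Source B's _URLS and _LOCALS: the mapping as two parallel tuples
def pvUrls : List String :=
  [ "https://cdn.jsdelivr.net/npm/leaflet@1.9.3/dist/leaflet.js",
    "https://code.jquery.com/jquery-1.12.4.min.js",
    "https://cdn.jsdelivr.net/npm/bootstrap@5.2.2/dist/js/bootstrap.bundle.min.js",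
    "https://cdnjs.cloudflare.com/ajax/libs/Leaflet.awesome-markers/2.0.2/leaflet.awesome-markers.js",
    "https://cdn.jsdelivr.net/npm/leaflet@1.9.3/dist/leaflet.css",
    "https://cdn.jsdelivr.net/npm/bootstrap@5.2.2/dist/css/bootstrap.min.css",
    "https://netdna.bootstrapcdn.com/bootstrap/3.0.0/css/bootstrap.min.css",
    "https://cdn.jsdelivr.net/npm/@fortawesome/fontawesome-free@6.2.0/css/all.min.css",
    "https://cdnjs.cloudflare.com/ajax/libs/Leaflet.awesome-markers/2.0.2/leaflet.awesome-markers.css",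
    "https://cdn.jsdelivr.net/gh/python-visualization/folium/folium/templates/leaflet.awesome.rotate.min.css" ]

def pvLocals : List String :=
  [ "assets/leaflet.js",
    "assets/jquery.min.js",
    "assets/bootstrap.bundle.min.js",
    "assets/leaflet.awesome-markers.js",
    "assets/leaflet.css",
    "assets/bootstrap.min.css",
    "assets/bootstrap-3.0.0.min.css",
    "assets/fontawesome-free-6.2.0.min.css",
    "assets/leaflet.awesome-markers.css",
    "assets/leaflet.awesome.rotate.min.css" ]

-- '_PAIRS = list(zip(_URLS, _LOCALS))'
def pvPairs : List (String × String) := pvUrls.zip pvLocals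

-- the same pairs on code points (the scan walks the string character by character)
def pvTable : List (List Char × List Char) :=
  pvPairs.map (fun p => (p.1.toList, p.2.toList))

-- the inner 'for url, local in _PAIRS: if html_string.startswith(url, i): … break' loop:
-- first pair whose key matches at this position, if any
def pvFindM (ts : List (List Char × List Char)) (l : List Char) : Option (List Char × List Char) :=
  ts.find? (fun p => p.1.isPrefixOf l)

-- the outer while loop: one left-to-right scan — at each position emit the value of the first
-- matching key and jump past it, else keep the character and advance by one
def pvScan (ts : List (List Char × List Char)) : List Char → List Char
  | [] => []
  | c :: t =>
    match pvFindM ts (c :: t) with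
    | some (k, v) => v ++ pvScan ts (t.drop (k.length - 1))
    | none => c :: pvScan ts t
  termination_by l => l.length
  decreasing_by
    · simp only [List.length_drop, List.length_cons]; omega
    · simp

def static_replace_with_local_alt (html_string : String) : String :=
  String.ofList (pvScan pvTable html_string.toList)

-- ===== PRECONDITION & SPEC =====
def Spec_static_replace_with_local (html_string : String) (out : String) : Prop := out = static_replace_with_local_alt html_string
instance (html_string : String) (out : String) : Decidable (Spec_static_replace_with_local html_string out) := by unfold Spec_static_replace_with_local; infer_instance

-- ===== CLAIM (what is proved, stated in full; the proofs are below) =====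
def Claim_equal_static_replace_with_local : Prop := ∀ (html_string : String), Dom_static_replace_with_local html_string → Spec_static_replace_with_local html_string (static_replace_with_local html_string)

-- ===== LEMMAS AND PROOFS =====

-- B's parsed table is exactly A's dict, on code points
set_option maxRecDepth 10000 in
lemma pvTable_eq : pvTable = pvReplacements.map (fun p => (p.1.toList, p.2.toList)) := by decide

-- structural form of one .replace pass (PySem.Chars.replace unwound from its fuel/accumulator shape)
def pvRep (old new : List Char) : List Char → List Char
  | [] => []
  | c :: t =>
    if old.isPrefixOf (c :: t) then new ++ pvRep old new (t.drop (old.length - 1))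
    else c :: pvRep old new t
  termination_by l => l.length
  decreasing_by
    · simp only [List.length_drop, List.length_cons]; omega
    · simp

-- the concrete non-overlap conditions that let one more .replace pass commute into the scan:
-- no occurrence of k starts inside an emitted replacement, no earlier key matches strictly inside k,
-- and no proper suffix of k begins where a replacement was emitted
def pvOk (ts : List (List Char × List Char)) (k : List Char) : Prop :=
  k ≠ [] ∧ ∀ p ∈ ts,
    (∀ i < p.2.length, ¬ k <+: p.2.drop i ∧ ¬ p.2.drop i <+: k) ∧
    (∀ j < k.length, 1 ≤ j →
      (¬ p.1 <+: k.drop j ∧ ¬ k.drop j <+: p.1) ∧ (¬ k.drop j <+: p.2 ∧ ¬ p.2 <+: k.drop j))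

def pvOkChain (ps : List (List Char × List Char)) : Prop :=
  ∀ n (h : n < ps.length), pvOk (ps.take n) (ps[n].1)

lemma pvScan_nil (ts : List (List Char × List Char)) : pvScan ts [] = [] := by
  simp [pvScan]

lemma pvScan_cons_some (ts : List (List Char × List Char)) (c : Char) (t k v : List Char)
    (h : pvFindM ts (c :: t) = some (k, v)) :
    pvScan ts (c :: t) = v ++ pvScan ts (t.drop (k.length - 1)) := by
  rw [pvScan, h]

lemma pvScan_cons_none (ts : List (List Char × List Char)) (c : Char) (t : List Char)
    (h : pvFindM ts (c :: t) = none) :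
    pvScan ts (c :: t) = c :: pvScan ts t := by
  rw [pvScan, h]

lemma pvRep_nil (old new : List Char) : pvRep old new [] = [] := by simp [pvRep]

lemma pvRep_cons (old new : List Char) (c : Char) (t : List Char) :
    pvRep old new (c :: t) =
      if old.isPrefixOf (c :: t) then new ++ pvRep old new (t.drop (old.length - 1))
      else c :: pvRep old new t := by
  rw [pvRep]

lemma pvScan_empty_table : ∀ l : List Char, pvScan [] l = l := by
  intro l
  induction l with
  | nil => exact pvScan_nil _
  | cons c t ih =>
    rw [pvScan_cons_none [] c t (by simp [pvFindM])]
    rw [ih]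

lemma pvPrefix_split {p a x : List Char} (h : p <+: a ++ x) : p <+: a ∨ a <+: p :=
  List.prefix_or_prefix_of_prefix h (List.prefix_append a x)

-- one .replace pass walks unchanged over a block no occurrence of k can start in
lemma pvRep_append (k v : List Char) :
    ∀ p : List Char, (∀ i < p.length, ¬ k <+: p.drop i ∧ ¬ p.drop i <+: k) →
      ∀ Z, pvRep k v (p ++ Z) = p ++ pvRep k v Z := by
  intro p
  induction p with
  | nil => intro _ Z; simp
  | cons c p' ih =>
    intro hcond Z
    have h0 := hcond 0 (by simp)
    simp only [List.drop_zero] at h0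
    have hnp : ¬ k.isPrefixOf (c :: (p' ++ Z)) = true := by
      rw [List.isPrefixOf_iff_prefix]
      intro hpre
      have hpre' : k <+: (c :: p') ++ Z := by rwa [List.cons_append]
      rcases pvPrefix_split hpre' with h | h
      · exact h0.1 h
      · exact h0.2 h
    rw [List.cons_append, pvRep_cons, if_neg hnp]
    rw [ih (fun i hi => by simpa using hcond (i + 1) (by simpa using hi)) Z, List.cons_append]

-- the scan walks unchanged through the body of k (no earlier key matches strictly inside k)
lemma pvScan_inside (ts : List (List Char × List Char)) (k : List Char)
    (hIn : ∀ p ∈ ts, ∀ j < k.length, 1 ≤ j → ¬ p.1 <+: k.drop j ∧ ¬ k.drop j <+: p.1) :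
    ∀ m j, 1 ≤ j → j ≤ k.length → k.length - j = m →
      ∀ r, pvScan ts (k.drop j ++ r) = k.drop j ++ pvScan ts r := by
  intro m
  induction m with
  | zero =>
    intro j _ hle hdiff r
    have hj : k.length ≤ j := by omega
    simp [List.drop_eq_nil_of_le hj]
  | succ m ih =>
    intro j hj1 _hle hdiff r
    have hjlt : j < k.length := by omega
    have hd : k.drop j = k[j] :: k.drop (j + 1) := List.drop_eq_getElem_cons hjlt
    have hnone : pvFindM ts (k[j] :: (k.drop (j + 1) ++ r)) = none := by
      unfold pvFindM
      rw [List.find?_eq_none]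
      intro p hp
      simp only [List.isPrefixOf_iff_prefix]
      have : (k[j] :: (k.drop (j + 1) ++ r)) = k.drop j ++ r := by
        rw [hd, List.cons_append]
      rw [this]
      intro hpre
      rcases pvPrefix_split hpre with h | h
      · exact (hIn p hp j hjlt hj1).1 h
      · exact (hIn p hp j hjlt hj1).2 h
    calc pvScan ts (k.drop j ++ r)
        = pvScan ts (k[j] :: (k.drop (j + 1) ++ r)) := by rw [hd, List.cons_append]
      _ = k[j] :: pvScan ts (k.drop (j + 1) ++ r) := pvScan_cons_none _ _ _ hnone
      _ = k[j] :: (k.drop (j + 1) ++ pvScan ts r) := by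
            rw [ih (j + 1) (by omega) (by omega) (by omega) r]
      _ = k.drop j ++ pvScan ts r := by rw [hd, List.cons_append]

-- the scan cannot create a new occurrence tail of k that was not already in the input
lemma pvScan_no_create (ts : List (List Char × List Char)) (k : List Char)
    (hC : ∀ p ∈ ts, ∀ j < k.length, 1 ≤ j → ¬ k.drop j <+: p.2 ∧ ¬ p.2 <+: k.drop j) :
    ∀ N u, u.length ≤ N → ∀ j, 1 ≤ j → j ≤ k.length →
      k.drop j <+: pvScan ts u → k.drop j <+: u := by
  intro N
  induction N with
  | zero =>
    intro u hu j _ _ hpre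
    have : u = [] := List.eq_nil_of_length_eq_zero (by omega)
    subst this
    rwa [pvScan_nil] at hpre
  | succ N ih =>
    intro u hu j hj1 hjle hpre
    by_cases hj : j = k.length
    · subst hj; simp
    have hjlt : j < k.length := by omega
    match u with
    | [] =>
      rw [pvScan_nil] at hpre
      have := List.eq_nil_of_prefix_nil hpre
      have : k.length ≤ j := by
        have h1 := congrArg List.length this
        simp at h1; omega
      omega
    | c :: t =>
      cases hf : pvFindM ts (c :: t) with
      | some q =>
        obtain ⟨k', v'⟩ := q
        have hmem : (k', v') ∈ ts := List.mem_of_find?_eq_some hf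
        rw [pvScan_cons_some ts c t k' v' hf] at hpre
        rcases pvPrefix_split hpre with h | h
        · exact absurd h (hC (k', v') hmem j hjlt hj1).1
        · exact absurd h (hC (k', v') hmem j hjlt hj1).2
      | none =>
        rw [pvScan_cons_none ts c t hf] at hpre
        rw [List.drop_eq_getElem_cons hjlt] at hpre ⊢
        rw [List.cons_prefix_cons] at hpre ⊢
        refine ⟨hpre.1, ?_⟩
        exact ih t (by simpa using Nat.lt_succ_iff.mp (by simpa using hu)) (j + 1)
          (by omega) (by omega) hpre.2

-- MAIN: one more .replace pass on the scan's output = the scan with that key appended to the table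
lemma pvMain (ts : List (List Char × List Char)) (k v : List Char) (hOk : pvOk ts k) :
    ∀ N s, s.length ≤ N → pvRep k v (pvScan ts s) = pvScan (ts ++ [(k, v)]) s := by
  obtain ⟨hk, hts⟩ := hOk
  have hIn : ∀ p ∈ ts, ∀ j < k.length, 1 ≤ j → ¬ p.1 <+: k.drop j ∧ ¬ k.drop j <+: p.1 :=
    fun p hp j hj hj1 => ((hts p hp).2 j hj hj1).1
  have hC : ∀ p ∈ ts, ∀ j < k.length, 1 ≤ j → ¬ k.drop j <+: p.2 ∧ ¬ p.2 <+: k.drop j :=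
    fun p hp j hj hj1 => ((hts p hp).2 j hj hj1).2
  intro N
  induction N with
  | zero =>
    intro s hs
    have : s = [] := List.eq_nil_of_length_eq_zero (by omega)
    subst this
    simp [pvScan_nil, pvRep_nil]
  | succ N ih =>
    intro s hs
    match s with
    | [] => simp [pvScan_nil, pvRep_nil]
    | c :: t =>
      have ht : t.length ≤ N := by simpa using Nat.lt_succ_iff.mp (by simpa using hs)
      cases hf : pvFindM ts (c :: t) with
      | some q =>
        obtain ⟨k', v'⟩ := q
        have hmem : (k', v') ∈ ts := List.mem_of_find?_eq_some hf
        have hfa : pvFindM (ts ++ [(k, v)]) (c :: t) = some (k', v') := by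
          unfold pvFindM at hf ⊢
          rw [List.find?_append, hf]; rfl
        rw [pvScan_cons_some ts c t k' v' hf,
            pvScan_cons_some (ts ++ [(k, v)]) c t k' v' hfa]
        rw [pvRep_append k v v' (fun i hi => (hts (k', v') hmem).1 i hi)]
        rw [ih (t.drop (k'.length - 1)) (le_trans (by simp) ht)]
      | none =>
        have hfts : ts.find? (fun p => p.1.isPrefixOf (c :: t)) = none := hf
        by_cases hkp : k <+: c :: t
        · -- k matches here: both sides emit v and jump past k
          obtain ⟨r, hr⟩ := hkp
          match k, hk with
          | khd :: ktl, _ =>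
            have hc : khd = c := by
              have := congrArg (fun l => l.headD ' ') hr
              simpa using this
            have htr : ktl ++ r = t := by
              have := congrArg List.tail hr
              simpa using this
            subst hc
            have hfa : pvFindM ((ts ++ [(khd :: ktl, v)])) (khd :: t) = some (khd :: ktl, v) := by
              unfold pvFindM
              rw [List.find?_append, hfts]
              have hpp : (khd :: ktl).isPrefixOf (khd :: t) = true := by
                rw [List.isPrefixOf_iff_prefix, ← htr, List.cons_prefix_cons]
                exact ⟨rfl, List.prefix_append _ _⟩
              simp [List.find?, hpp]
            have hscan : pvScan ts (khd :: t) = khd :: (ktl ++ pvScan ts r) := by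
              rw [pvScan_cons_none ts khd t hf, ← htr]
              have := pvScan_inside ts (khd :: ktl) hIn ((khd :: ktl).length - 1) 1
                (by omega) (by simp) (by simp) r
              simpa using this
            rw [hscan, pvScan_cons_some _ khd t (khd :: ktl) v hfa]
            have hp : (khd :: ktl).isPrefixOf (khd :: (ktl ++ pvScan ts r)) = true := by
              rw [List.isPrefixOf_iff_prefix, List.cons_prefix_cons]
              exact ⟨rfl, List.prefix_append ktl _⟩
            rw [pvRep_cons, if_pos hp]
            have hdrop1 : (ktl ++ pvScan ts r).drop ((khd :: ktl).length - 1) = pvScan ts r := by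
              simp [List.drop_left' (l₁ := ktl) (l₂ := pvScan ts r) rfl]
            have hdrop2 : t.drop ((khd :: ktl).length - 1) = r := by
              rw [← htr]
              simp [List.drop_left' (l₁ := ktl) (l₂ := r) rfl]
            rw [hdrop1, hdrop2]
            have hrlen : r.length ≤ N := by
              have := congrArg List.length htr
              simp at this; omega
            rw [ih r hrlen]
        · -- no key matches here: both sides keep c
          have hfa : pvFindM (ts ++ [(k, v)]) (c :: t) = none := by
            unfold pvFindM
            rw [List.find?_append, hfts]
            have hb : k.isPrefixOf (c :: t) = false := by
              rw [Bool.eq_false_iff]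
              exact fun hb => hkp (List.isPrefixOf_iff_prefix.mp hb)
            simp [List.find?, hb]
          rw [pvScan_cons_none ts c t hf, pvScan_cons_none _ c t hfa]
          have hnp : ¬ k.isPrefixOf (c :: pvScan ts t) = true := by
            rw [List.isPrefixOf_iff_prefix]
            intro hpre
            match k, hk with
            | khd :: ktl, _ =>
              rw [List.cons_prefix_cons] at hpre
              have h2 : ktl <+: t := by
                have := pvScan_no_create ts (khd :: ktl) hC t.length t le_rfl 1
                  (by omega) (by simp)
                simp only [List.drop_succ_cons, List.drop_zero] at this
                exact this hpre.2
              exact hkp (by rw [hpre.1, List.cons_prefix_cons]; exact ⟨rfl, h2⟩)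
          rw [pvRep_cons, if_neg hnp, ih t ht]

-- the nested sequence of passes, keys taken left to right, equals one scan over the whole table
lemma pvFold_eq_scan :
    ∀ ps : List (List Char × List Char), pvOkChain ps →
      ∀ l : List Char, ps.foldl (fun l q => pvRep q.1 q.2 l) l = pvScan ps l := by
  intro ps
  induction ps using List.reverseRecOn with
  | nil => intro _ l; simp [pvScan_empty_table]
  | append_singleton qs q ih =>
    intro hchain l
    obtain ⟨k0, v0⟩ := q
    have hqs : pvOkChain qs := by
      intro n h
      have h' : n < (qs ++ [(k0, v0)]).length := by simp; omega
      have := hchain n h'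
      rwa [List.take_append_of_le_length (by omega), List.getElem_append_left h] at this
    have hok : pvOk qs k0 := by
      have h' : qs.length < (qs ++ [(k0, v0)]).length := by simp
      have h2 := hchain qs.length h'
      simp only [List.take_left, List.getElem_concat_length] at h2
      exact h2
    rw [List.foldl_append, List.foldl_cons, List.foldl_nil, ih hqs l]
    exact pvMain qs k0 v0 hok l.length l le_rfl

-- the A-side fold, pushed down to code points
lemma pvFoldl_replace_toList :
    ∀ (ps : List (String × String)) (s : String),
      (ps.foldl (fun s p => PySem.Str.replace s p.1 p.2) s).toList =
        (ps.map (fun p => (p.1.toList, p.2.toList))).foldl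
          (fun l q => PySem.Chars.replace l q.1 q.2) s.toList := by
  intro ps
  induction ps with
  | nil => intro s; simp
  | cons p ps ih =>
    intro s
    rw [List.foldl_cons, List.map_cons, List.foldl_cons, ih, PySem.Str.toList_replace]

-- PySem.Chars.replace.go with enough fuel is the structural pass pvRep
lemma pvGo_eq (old new : List Char) (hk : old ≠ []) :
    ∀ fuel l acc, l.length ≤ fuel →
      PySem.Chars.replace.go old new fuel l acc = acc.reverse ++ pvRep old new l := by
  intro fuel
  induction fuel with
  | zero =>
    intro l acc hl
    have : l = [] := List.eq_nil_of_length_eq_zero (by omega)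
    subst this
    simp [PySem.Chars.replace.go, pvRep_nil]
  | succ fuel ih =>
    intro l acc hl
    match l with
    | [] => simp [PySem.Chars.replace.go, pvRep_nil]
    | c :: t =>
      have hl' : t.length ≤ fuel := by
        simp only [List.length_cons] at hl; omega
      rw [PySem.Chars.replace.go]
      rw [pvRep_cons]
      by_cases hp : old.isPrefixOf (c :: t) = true
      · rw [if_pos hp, if_pos hp]
        match old, hk with
        | o :: os, _ =>
          have hdrop : (c :: t).drop (o :: os).length = t.drop ((o :: os).length - 1) := by
            simp
          rw [hdrop, ih (t.drop ((o :: os).length - 1)) (new.reverse ++ acc)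
            (by simp only [List.length_drop, List.length_cons]; omega)]
          simp
      · rw [if_neg hp, if_neg hp, ih t (c :: acc) hl']
        simp

lemma pvReplace_eq_rep (old new : List Char) (hk : old ≠ []) (s : List Char) :
    PySem.Chars.replace s old new = pvRep old new s := by
  unfold PySem.Chars.replace
  rw [if_neg (by simpa [List.isEmpty_iff] using hk)]
  simpa using pvGo_eq old new hk s.length s [] le_rfl

lemma pvFoldl_replace_eq_rep :
    ∀ (ps : List (List Char × List Char)), (∀ p ∈ ps, p.1 ≠ []) →
      ∀ l, ps.foldl (fun l q => PySem.Chars.replace l q.1 q.2) l =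
        ps.foldl (fun l q => pvRep q.1 q.2 l) l := by
  intro ps
  induction ps with
  | nil => intro _ l; rfl
  | cons p ps ih =>
    intro h l
    rw [List.foldl_cons, List.foldl_cons,
        pvReplace_eq_rep p.1 p.2 (h p (by simp)) l,
        ih (fun q hq => h q (by simp [hq])) _]

lemma pvChain_ok : pvOkChain (pvReplacements.map (fun p => (p.1.toList, p.2.toList))) := by
  unfold pvOkChain pvOk; decide

lemma pvKeys_ne_nil : ∀ p ∈ pvReplacements.map (fun p => (p.1.toList, p.2.toList)), p.1 ≠ [] := by
  decide

-- ===== VERDICT (by name: the statement is the Claim_ definition above) =====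
theorem static_replace_with_local_spec : Claim_equal_static_replace_with_local := by
  intro h _dom
  unfold Spec_static_replace_with_local static_replace_with_local static_replace_with_local_alt
  apply String.toList_inj.mp
  rw [pvFoldl_replace_toList]
  rw [pvFoldl_replace_eq_rep _ pvKeys_ne_nil,
      pvFold_eq_scan _ pvChain_ok, pvTable_eq]
  simp
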